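-- pv_equiv track=rewrite | github.com/BasicGenomics/BaseCode | workflow/scripts/make_sample_files.py | get_forward_and_reverse_sequences
-- ===== SOURCE A (Python) =====
-- complement = {'A': 'T', 'C': 'G', 'G': 'C', 'T': 'A', 'N': 'N'}
--
-- def reverse_complement(seq):
--     return ''.join([complement[s] for s in seq][::-1])
--
-- def get_forward_and_reverse_sequences(index_sequence_map):
--     index1_sequences_forward = []
--     index2_sequences_forward = []
--     index1_sequences_reverse = []
--     index2_sequences_reverse = []
--     for name, barcodes in index_sequence_map.items():
--         if barcodes is None or name is None:
--             continue
--         if 'Fw' in name: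
--             for barcode in barcodes.split(';'):
--                 index1_sequences_forward.append(barcode)
--                 index1_sequences_reverse.append(reverse_complement(barcode))
--         elif 'Rv' in name:
--             for barcode in barcodes.split(';'):
--                 index2_sequences_forward.append(barcode)
--                 index2_sequences_reverse.append(reverse_complement(barcode))
--     return index1_sequences_forward, index1_sequences_reverse, index2_sequences_forward, index2_sequences_reverse
-- ===== SOURCE B (Python) =====
-- def reverse_complement(seq):
--     # recursive: rc(seq) = rc(tail) + complement(head)
--     if seq == '':
--         return ''
--     return reverse_complement(seq[1:]) + 'TGCAN'['ACGTN'.index(seq[0])]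
--
-- def get_forward_and_reverse_sequences(index_sequence_map):
--     # two independent comprehension scans (Fw names; then Rv-but-not-Fw names, matching A's elif),
--     # then the reverse lists are derived from the forward lists
--     fw = [b for name, bcs in index_sequence_map.items()
--           if name is not None and bcs is not None and 'Fw' in name
--           for b in bcs.split(';')]
--     rv = [b for name, bcs in index_sequence_map.items()
--           if name is not None and bcs is not None and 'Fw' not in name and 'Rv' in name
--           for b in bcs.split(';')]
--     return fw, [reverse_complement(b) for b in fw], rv, [reverse_complement(b) for b in rv]
-- ===== Notes on version B (the rewrite author's own statement) =====
-- stated objective: alternative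
-- what changed: A's single interleaved loop with four accumulator lists is replaced by two independent comprehension scans of the map (Fw names, then Rv-not-Fw names) collecting only forward barcodes, with the two reverse lists derived afterwards by mapping; reverse_complement is rewritten as structural recursion (rc(tail)+complement(head)) with the complement taken by positional string indexing instead of a dict.
import Mathlib
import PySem

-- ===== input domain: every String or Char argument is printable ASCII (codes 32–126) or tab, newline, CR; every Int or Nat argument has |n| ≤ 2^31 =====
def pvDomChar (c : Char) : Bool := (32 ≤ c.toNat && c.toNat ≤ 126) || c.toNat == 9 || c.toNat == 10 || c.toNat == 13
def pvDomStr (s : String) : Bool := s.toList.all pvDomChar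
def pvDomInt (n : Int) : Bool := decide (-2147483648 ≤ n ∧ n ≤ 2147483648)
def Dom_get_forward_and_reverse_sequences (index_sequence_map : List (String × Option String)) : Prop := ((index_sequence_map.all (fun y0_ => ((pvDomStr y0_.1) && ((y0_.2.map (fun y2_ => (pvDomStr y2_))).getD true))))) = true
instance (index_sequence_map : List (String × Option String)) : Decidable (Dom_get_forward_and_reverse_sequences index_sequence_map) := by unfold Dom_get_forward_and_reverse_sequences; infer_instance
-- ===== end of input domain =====

-- B replaces A's interleaved four-accumulator loop by two independent comprehension scans
-- collecting forward barcodes plus map-derived reverse lists, with a recursive reverse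
-- complement; objective: alternative. Equal return value on Pre_.

-- shared primitive: barcodes.split(';') — sep ";" is a nonempty literal, so PySem.Str.split? is always some
def pvSplitSemi (s : String) : List String := (PySem.Str.split? s ";").getD []

-- ===== PORT A =====
def pvComplement : PySem.Dict Char Char :=
  PySem.Dict.ofList [('A','T'), ('C','G'), ('G','C'), ('T','A'), ('N','N')]

-- complement[s] raises KeyError on other characters; the port uses getD with a dummy '?' there —
-- Pre_get_forward_and_reverse_sequences excludes exactly those inputs.
def reverse_complement (seq : String) : String :=
  String.mk ((seq.toList.map (fun s => pvComplement.getD s '?')).reverse)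

def get_forward_and_reverse_sequences (index_sequence_map : List (String × Option String)) : List String × List String × List String × List String :=
  index_sequence_map.foldl
    (fun acc p =>
      match p.2 with
      | none => acc
      | some barcodes =>
        if PySem.Str.isIn "Fw" p.1 then
          (pvSplitSemi barcodes).foldl
            (fun a b => (a.1 ++ [b], a.2.1 ++ [reverse_complement b], a.2.2.1, a.2.2.2)) acc
        else if PySem.Str.isIn "Rv" p.1 then
          (pvSplitSemi barcodes).foldl
            (fun a b => (a.1, a.2.1, a.2.2.1 ++ [b], a.2.2.2 ++ [reverse_complement b])) acc
        else acc)
    ([], [], [], [])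

-- ===== PORT B =====
-- 'TGCAN'['ACGTN'.index(c)]; .index raises ValueError on other characters (excluded by Pre_), '?' stands in
def pvCompB (c : Char) : Char :=
  match PySem.List.index? ("ACGTN".toList) c with
  | some i => (PySem.List.pyGet? ("TGCAN".toList) i).getD '?'
  | none => '?'

-- Source B's recursion rc(seq) = rc(seq[1:]) + comp(seq[0]), transcribed on the character list
def pvRcChars : List Char → List Char
  | [] => []
  | c :: rest => pvRcChars rest ++ [pvCompB c]

def reverse_complement_alt (seq : String) : String := String.mk (pvRcChars seq.toList)

def get_forward_and_reverse_sequences_alt (index_sequence_map : List (String × Option String)) : List String × List String × List String × List String :=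
  let fw := index_sequence_map.flatMap (fun p =>
    match p.2 with
    | none => []
    | some b => if PySem.Str.isIn "Fw" p.1 then pvSplitSemi b else [])
  let rv := index_sequence_map.flatMap (fun p =>
    match p.2 with
    | none => []
    | some b => if !PySem.Str.isIn "Fw" p.1 && PySem.Str.isIn "Rv" p.1 then pvSplitSemi b else [])
  (fw, fw.map reverse_complement_alt, rv, rv.map reverse_complement_alt)

-- ===== PRECONDITION & SPEC =====
-- Pre_ excludes exactly the inputs on which A raises KeyError (and B ValueError): an entry whose name
-- contains 'Fw' or 'Rv' and whose barcode string contains a character outside 'ACGTN' (';' aside).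
def Pre_get_forward_and_reverse_sequences (index_sequence_map : List (String × Option String)) : Prop :=
  index_sequence_map.all (fun p =>
    match p.2 with
    | none => true
    | some b =>
      !(PySem.Str.isIn "Fw" p.1 || PySem.Str.isIn "Rv" p.1) ||
      (pvSplitSemi b).all (fun part =>
        part.toList.all (fun c => (['A','C','G','T','N'] : List Char).contains c))) = true
instance (index_sequence_map : List (String × Option String)) : Decidable (Pre_get_forward_and_reverse_sequences index_sequence_map) := by unfold Pre_get_forward_and_reverse_sequences; infer_instance

def pvWitness_get_forward_and_reverse_sequences : (List (String × Option String)) :=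
  [("i7 Fw", some "ACGT;TTN"), ("i5 Rv", some "GG"), ("none", none), ("other", some "xyz")]

def Spec_get_forward_and_reverse_sequences (index_sequence_map : List (String × Option String)) (out : List String × List String × List String × List String) : Prop := out = get_forward_and_reverse_sequences_alt index_sequence_map
instance (index_sequence_map : List (String × Option String)) (out : List String × List String × List String × List String) : Decidable (Spec_get_forward_and_reverse_sequences index_sequence_map out) := by unfold Spec_get_forward_and_reverse_sequences; infer_instance

-- ===== CLAIM (what is proved, stated in full; the proofs are below) =====
def Claim_equal_get_forward_and_reverse_sequences : Prop := ∀ (index_sequence_map : List (String × Option String)), Dom_get_forward_and_reverse_sequences index_sequence_map → Pre_get_forward_and_reverse_sequences index_sequence_map → Spec_get_forward_and_reverse_sequences index_sequence_map (get_forward_and_reverse_sequences index_sequence_map)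

-- ===== LEMMAS AND PROOFS =====

-- B's recursion is the reversed map of the per-character complement
theorem pvRcChars_eq (l : List Char) : pvRcChars l = (l.map pvCompB).reverse := by
  induction l with
  | nil => rfl
  | cons c rest ih => simp [pvRcChars, ih]

-- the two reverse complements agree on strings over {A,C,G,T,N}
theorem pv_rc_eq (s : String)
    (h : ∀ c ∈ s.toList, (['A','C','G','T','N'] : List Char).contains c = true) :
    reverse_complement s = reverse_complement_alt s := by
  unfold reverse_complement reverse_complement_alt
  rw [pvRcChars_eq]
  congr 2
  apply List.map_congr_left
  intro c hc
  have := h c hc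
  simp only [List.contains_eq_mem, List.mem_cons, decide_eq_true_eq] at this
  rcases this with h | h | h | h | h | h
  · subst h; decide
  · subst h; decide
  · subst h; decide
  · subst h; decide
  · subst h; decide
  · simp at h

-- A's Fw inner loop appends the parts to the first list and their reverse complements to the second
theorem pv_innerFw (parts : List String) (f1 r1 f2 r2 : List String) :
    parts.foldl (fun a b => (a.1 ++ [b], a.2.1 ++ [reverse_complement b], a.2.2.1, a.2.2.2))
      (f1, r1, f2, r2)
    = (f1 ++ parts, r1 ++ parts.map reverse_complement, f2, r2) := by
  induction parts generalizing f1 r1 with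
  | nil => simp
  | cons p ps ih => simp [List.foldl_cons, ih]

theorem pv_innerRv (parts : List String) (f1 r1 f2 r2 : List String) :
    parts.foldl (fun a b => (a.1, a.2.1, a.2.2.1 ++ [b], a.2.2.2 ++ [reverse_complement b]))
      (f1, r1, f2, r2)
    = (f1, r1, f2 ++ parts, r2 ++ parts.map reverse_complement) := by
  induction parts generalizing f2 r2 with
  | nil => simp
  | cons p ps ih => simp [List.foldl_cons, ih]

-- main loop invariant: A's four-list fold equals the two flatMap scans with map-derived reverse lists
theorem pv_main (m : List (String × Option String))
    (h : Pre_get_forward_and_reverse_sequences m) (f1 f2 : List String) :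
    m.foldl
      (fun acc p =>
        match p.2 with
        | none => acc
        | some barcodes =>
          if PySem.Str.isIn "Fw" p.1 then
            (pvSplitSemi barcodes).foldl
              (fun a b => (a.1 ++ [b], a.2.1 ++ [reverse_complement b], a.2.2.1, a.2.2.2)) acc
          else if PySem.Str.isIn "Rv" p.1 then
            (pvSplitSemi barcodes).foldl
              (fun a b => (a.1, a.2.1, a.2.2.1 ++ [b], a.2.2.2 ++ [reverse_complement b])) acc
          else acc)
      (f1, f1.map reverse_complement_alt, f2, f2.map reverse_complement_alt)
    = (let fw := f1 ++ m.flatMap (fun p =>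
          match p.2 with
          | none => []
          | some b => if PySem.Str.isIn "Fw" p.1 then pvSplitSemi b else [])
       let rv := f2 ++ m.flatMap (fun p =>
          match p.2 with
          | none => []
          | some b => if !PySem.Str.isIn "Fw" p.1 && PySem.Str.isIn "Rv" p.1 then pvSplitSemi b else [])
       (fw, fw.map reverse_complement_alt, rv, rv.map reverse_complement_alt)) := by
  induction m generalizing f1 f2 with
  | nil => simp
  | cons p ps ih =>
    unfold Pre_get_forward_and_reverse_sequences at h
    simp only [List.all_cons, Bool.and_eq_true] at h
    obtain ⟨hp, hps⟩ := h
    have hPre : Pre_get_forward_and_reverse_sequences ps := by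
      unfold Pre_get_forward_and_reverse_sequences; exact hps
    simp only [List.foldl_cons, List.flatMap_cons]
    cases hb : p.2 with
    | none => simpa using ih hPre f1 f2
    | some b =>
      simp only [hb] at hp ⊢
      by_cases hFw : PySem.Str.isIn "Fw" p.1 = true
      · have hchars : ∀ part ∈ pvSplitSemi b,
            ∀ c ∈ part.toList, (['A','C','G','T','N'] : List Char).contains c = true := by
          simp only [hFw, Bool.true_or, Bool.not_true, Bool.false_or, List.all_eq_true] at hp
          intro part hpart c hc
          exact hp part hpart c hc
        have hmap : (pvSplitSemi b).map reverse_complement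
            = (pvSplitSemi b).map reverse_complement_alt := by
          apply List.map_congr_left
          intro part hpart
          exact pv_rc_eq part (hchars part hpart)
        simp only [hFw, if_true, pv_innerFw, hmap, ← List.map_append, Bool.not_true,
          Bool.false_and, if_neg (by simp : ¬ (false = true))]
        simpa [List.append_assoc] using ih hPre (f1 ++ pvSplitSemi b) f2
      · by_cases hRv : PySem.Str.isIn "Rv" p.1 = true
        · have hchars : ∀ part ∈ pvSplitSemi b,
              ∀ c ∈ part.toList, (['A','C','G','T','N'] : List Char).contains c = true := by
            simp only [hRv, Bool.or_true, Bool.not_true, Bool.false_or, List.all_eq_true] at hp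
            intro part hpart c hc
            exact hp part hpart c hc
          have hmap : (pvSplitSemi b).map reverse_complement
              = (pvSplitSemi b).map reverse_complement_alt := by
            apply List.map_congr_left
            intro part hpart
            exact pv_rc_eq part (hchars part hpart)
          have hFw' : PySem.Str.isIn "Fw" p.1 = false := by simpa using hFw
          simp only [hFw', hRv, Bool.false_eq_true, if_false, if_true, pv_innerRv, hmap,
            ← List.map_append, Bool.not_false, Bool.true_and]
          simpa [List.append_assoc] using ih hPre f1 (f2 ++ pvSplitSemi b)
        · have hFw' : PySem.Str.isIn "Fw" p.1 = false := by simpa using hFw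
          have hRv' : PySem.Str.isIn "Rv" p.1 = false := by simpa using hRv
          simp only [hFw', hRv', Bool.false_eq_true, if_false, Bool.and_false]
          simpa using ih hPre f1 f2

-- ===== VERDICT (by name: the statement is the Claim_ definition above) =====
theorem get_forward_and_reverse_sequences_spec : Claim_equal_get_forward_and_reverse_sequences := by
  unfold Claim_equal_get_forward_and_reverse_sequences
  intro m _ hPre
  unfold Spec_get_forward_and_reverse_sequences
  unfold get_forward_and_reverse_sequences get_forward_and_reverse_sequences_alt
  have := pv_main m hPre [] []
  simpa using this
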